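-- pv_equiv track=rewrite | github.com/ficorrea/python_test_codes | code_experience/binary converter/conv.py | gerar
-- ===== SOURCE A (Python) =====
-- def gerar(num):
--     ger = []
--     tam = 1
--     while num >= tam:
--         ger.append(tam)
--         tam *= 2
--     ger.reverse()
--     return ger
-- ===== SOURCE B (Python) =====
-- def gerar(num):
--     tam = 1
--     while tam <= num:
--         tam *= 2
--     tam //= 2
--     ger = []
--     while tam >= 1:
--         ger.append(tam)
--         tam //= 2
--     return ger
-- ===== Notes on version B (the rewrite author's own statement) =====
-- stated objective: alternative
-- what changed: B first climbs to the smallest power of two exceeding num, then emits the result directly in descending order by repeated halving, instead of A's append-ascending-then-reverse single loop.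
import Mathlib
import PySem

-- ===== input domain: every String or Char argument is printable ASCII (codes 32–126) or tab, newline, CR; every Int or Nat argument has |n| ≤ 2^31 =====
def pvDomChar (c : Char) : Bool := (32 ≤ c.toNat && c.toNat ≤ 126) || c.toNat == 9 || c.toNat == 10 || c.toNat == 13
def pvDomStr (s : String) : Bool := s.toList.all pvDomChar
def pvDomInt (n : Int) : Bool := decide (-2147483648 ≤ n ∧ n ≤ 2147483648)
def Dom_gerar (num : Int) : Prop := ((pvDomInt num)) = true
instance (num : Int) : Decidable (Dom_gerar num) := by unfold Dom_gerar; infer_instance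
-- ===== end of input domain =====

-- B lists the powers of two ≤ num in descending order directly (climb then halve) instead of A's append-then-reverse; alternative decomposition, same cost.

-- ===== PORT A =====
-- A's while loop: while num >= tam: ger.append(tam); tam *= 2   (tam stays ≥ 1, carried as a proof for termination)
def gerarLoopA (num tam : Int) (h : 1 ≤ tam) (ger : List Int) : List Int :=
  if num ≥ tam then gerarLoopA num (tam * 2) (by omega) (ger ++ [tam]) else ger
termination_by (num + 1 - tam).toNat
decreasing_by omega

def gerar (num : Int) : List Int := (gerarLoopA num 1 (by norm_num) []).reverse

-- ===== PORT B =====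
-- B's first loop: while tam <= num: tam *= 2
def climbB (num tam : Int) (h : 1 ≤ tam) : Int :=
  if tam ≤ num then climbB num (tam * 2) (by omega) else tam
termination_by (num + 1 - tam).toNat
decreasing_by omega

-- B's second loop: while tam >= 1: ger.append(tam); tam //= 2
def descB (tam : Int) (ger : List Int) : List Int :=
  if tam ≥ 1 then descB (PySem.Int.floordiv tam 2) (ger ++ [tam]) else ger
termination_by tam.toNat
decreasing_by
  rw [PySem.Int.floordiv_eq_ediv_of_pos (by norm_num)]
  omega

def gerar_alt (num : Int) : List Int :=
  descB (PySem.Int.floordiv (climbB num 1 (by norm_num)) 2) []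

-- ===== PRECONDITION & SPEC =====
def Spec_gerar (num : Int) (out : List Int) : Prop := out = gerar_alt num
instance (num : Int) (out : List Int) : Decidable (Spec_gerar num out) := by unfold Spec_gerar; infer_instance

-- ===== CLAIM (what is proved, stated in full; the proofs are below) =====
def Claim_equal_gerar : Prop := ∀ (num : Int), Dom_gerar num → Spec_gerar num (gerar num)

-- ===== LEMMAS AND PROOFS =====

lemma fd2 (t : Int) : PySem.Int.floordiv t 2 = t / 2 :=
  PySem.Int.floordiv_eq_ediv_of_pos (by norm_num)

lemma gerarLoopA_acc (num : Int) : ∀ (n : Nat) (tam : Int) (h : 1 ≤ tam) (ger : List Int),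
    (num + 1 - tam).toNat ≤ n → gerarLoopA num tam h ger = ger ++ gerarLoopA num tam h [] := by
  intro n
  induction n with
  | zero =>
    intro tam h ger hb
    conv_lhs => rw [gerarLoopA]
    conv_rhs => rw [gerarLoopA]
    have : ¬ num ≥ tam := by omega
    simp [this]
  | succ n ih =>
    intro tam h ger hb
    conv_lhs => rw [gerarLoopA]
    conv_rhs => rw [gerarLoopA]
    by_cases hc : num ≥ tam
    · simp only [hc, if_pos]
      rw [ih (tam * 2) (by omega) (ger ++ [tam]) (by omega),
          ih (tam * 2) (by omega) ([] ++ [tam]) (by omega)]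
      simp
    · simp [hc]

lemma descB_acc : ∀ (n : Nat) (tam : Int) (ger : List Int),
    tam.toNat ≤ n → descB tam ger = ger ++ descB tam [] := by
  intro n
  induction n with
  | zero =>
    intro tam ger hb
    conv_lhs => rw [descB]
    conv_rhs => rw [descB]
    have : ¬ tam ≥ 1 := by omega
    simp [this]
  | succ n ih =>
    intro tam ger hb
    conv_lhs => rw [descB]
    conv_rhs => rw [descB]
    by_cases hc : tam ≥ 1
    · simp only [hc, if_pos]
      have hlt : (PySem.Int.floordiv tam 2).toNat ≤ n := by
        rw [fd2]; omega
      rw [ih _ (ger ++ [tam]) hlt, ih _ ([] ++ [tam]) hlt]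
      simp
    · simp [hc]

lemma floordiv_double (tam : Int) : PySem.Int.floordiv (tam * 2) 2 = tam := by
  rw [fd2]
  omega

lemma gerar_main (num : Int) : ∀ (n : Nat) (tam : Int) (h : 1 ≤ tam),
    (num + 1 - tam).toNat ≤ n →
    (gerarLoopA num tam h []).reverse ++ descB (PySem.Int.floordiv tam 2) []
      = descB (PySem.Int.floordiv (climbB num tam h) 2) [] := by
  intro n
  induction n with
  | zero =>
    intro tam h hb
    rw [gerarLoopA, climbB]
    have : ¬ num ≥ tam := by omega
    simp [this]
  | succ n ih =>
    intro tam h hb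
    by_cases hc : num ≥ tam
    · rw [gerarLoopA, climbB]
      simp only [hc, if_pos]
      rw [gerarLoopA_acc num (n+1) (tam * 2) (by omega) ([] ++ [tam]) (by omega)]
      have hdesc : descB tam [] = [tam] ++ descB (PySem.Int.floordiv tam 2) [] := by
        conv_lhs => rw [descB]
        simp only [show tam ≥ 1 from h, if_pos]
        exact descB_acc (PySem.Int.floordiv tam 2).toNat _ [tam] (le_refl _)
      calc (([] ++ [tam]) ++ gerarLoopA num (tam * 2) (by omega) []).reverse
             ++ descB (PySem.Int.floordiv tam 2) []
          = (gerarLoopA num (tam * 2) (by omega) []).reverse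
             ++ ([tam] ++ descB (PySem.Int.floordiv tam 2) []) := by simp
        _ = (gerarLoopA num (tam * 2) (by omega) []).reverse
             ++ descB (PySem.Int.floordiv (tam * 2) 2) [] := by
              rw [floordiv_double, hdesc]
        _ = descB (PySem.Int.floordiv (climbB num (tam * 2) (by omega)) 2) [] := by
              exact ih (tam * 2) (by omega) (by omega)
    · rw [gerarLoopA, climbB]
      simp [hc]

-- ===== VERDICT (by name: the statement is the Claim_ definition above) =====
theorem gerar_spec : Claim_equal_gerar := by
  intro num _
  unfold Spec_gerar gerar gerar_alt
  have h := gerar_main num (num + 1 - 1).toNat 1 (by norm_num) (le_refl _)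
  have h0 : descB (PySem.Int.floordiv 1 2) [] = [] := by
    rw [descB.eq_def]; decide
  rw [h0] at h
  simpa using h
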